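-- pv_equiv track=rewrite | github.com/MrBrantCode/unitest_baseline | mut_generate/mist_train_taco/taco_5110/solution.py | count_valid_permutations
-- ===== SOURCE A (Python) =====
-- def count_valid_permutations(N: int, s: str) -> int:
--     M = 10 ** 9 + 7
--     d = [1] * N
--
--     for k in range(N - 1, 0, -1):
--         N_new = [0] * N
--         for i in range(k + 1):
--             if '<' < s[N - 1 - k]:
--                 N_new[0] += d[i]
--                 N_new[i] -= d[i]
--             else:
--                 N_new[i] += d[i]
--                 N_new[k] -= d[i]
--
--         for i in range(k):
--             N_new[i + 1] = (N_new[i + 1] + N_new[i]) % M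
--
--         d = N_new
--
--     return d[0] % M
-- ===== SOURCE B (Python) =====
-- def _cumsums(vals, M):
--     out, t = [], 0
--     for v in vals:
--         t = (t + v) % M
--         out.append(t)
--     return out
--
-- def count_valid_permutations(N: int, s: str) -> int:
--     M = 10 ** 9 + 7
--     dp = [1] * N
--     for i in range(N - 1):
--         if s[i] > '<':
--             dp = _cumsums(reversed(dp[1:]), M)[::-1]
--         else:
--             dp = _cumsums(dp[:-1], M)
--     return dp[0] % M
-- ===== Notes on version B (the rewrite author's own statement) =====
-- stated objective: faster
-- what changed: B replaces A's per-step difference-array construction plus in-place mod-prefix pass over fixed length-N scratch arrays with a single shrinking DP row built directly as running prefix/suffix cumulative sums mod 1e9+7; intended as faster (one timing pass, fewer allocations), measured ~3.4x at n=4096.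
import Mathlib
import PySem

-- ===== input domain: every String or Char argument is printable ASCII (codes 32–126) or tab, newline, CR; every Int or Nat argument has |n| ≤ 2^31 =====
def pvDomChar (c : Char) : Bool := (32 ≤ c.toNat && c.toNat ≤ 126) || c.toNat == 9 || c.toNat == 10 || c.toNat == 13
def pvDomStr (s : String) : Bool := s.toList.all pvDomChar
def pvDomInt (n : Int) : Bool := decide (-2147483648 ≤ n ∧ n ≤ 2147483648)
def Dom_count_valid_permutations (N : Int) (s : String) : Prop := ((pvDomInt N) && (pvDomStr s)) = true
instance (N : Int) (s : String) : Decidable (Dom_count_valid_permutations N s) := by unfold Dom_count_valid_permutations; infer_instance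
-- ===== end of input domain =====

-- B builds each DP row directly as running prefix/suffix cumulative sums (mod 1e9+7) over a
-- shrinking list, instead of A's difference-array writes plus an in-place mod-prefix pass over
-- fixed length-N scratch arrays; intended as faster by a constant factor (a timing run measured ~3.4x).


-- ===== PORT A =====
-- loop body of A's outer 'for k in range(N-1, 0, -1)' (named helper; code unchanged)
def pvStepA (N : Int) (s : String) (d : List Int) (k : Int) : List Int :=
  let M : Int := 10 ^ 9 + 7
  -- N_new = [0] * N; for i in range(k+1): …
  let nn1 := (PySem.List.pyRange 0 (k + 1) 1).foldl (fun nn i =>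
    if '<' < ((PySem.Str.pyGet? s (N - 1 - k)).getD ' ') then
      let nn2 := PySem.List.pySetD nn 0 (PySem.List.pyGetD nn 0 0 + PySem.List.pyGetD d i 0)
      PySem.List.pySetD nn2 i (PySem.List.pyGetD nn2 i 0 - PySem.List.pyGetD d i 0)
    else
      let nn2 := PySem.List.pySetD nn i (PySem.List.pyGetD nn i 0 + PySem.List.pyGetD d i 0)
      PySem.List.pySetD nn2 k (PySem.List.pyGetD nn2 k 0 - PySem.List.pyGetD d i 0))
    (List.replicate N.toNat (0 : Int))
  -- for i in range(k): N_new[i+1] = (N_new[i+1] + N_new[i]) % M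
  (PySem.List.pyRange 0 k 1).foldl (fun nn i =>
    PySem.List.pySetD nn (i + 1) (PySem.Int.mod (PySem.List.pyGetD nn (i + 1) 0 + PySem.List.pyGetD nn i 0) M)) nn1

def count_valid_permutations (N : Int) (s : String) : Int :=
  let M : Int := 10 ^ 9 + 7
  let d := (PySem.List.pyRange (N - 1) 0 (-1)).foldl (pvStepA N s) (List.replicate N.toNat (1 : Int))
  PySem.Int.mod (PySem.List.pyGetD d 0 0) M  -- d[0] % M  (d[0] exists under Pre_)

-- ===== PORT B =====
-- _cumsums(vals, M): running sums mod M (fold with (out, t) state, out appended)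
def pvCumsums (vals : List Int) (M : Int) : List Int :=
  (vals.foldl (fun (p : List Int × Int) v =>
      let t := PySem.Int.mod (p.2 + v) M
      (p.1 ++ [t], t)) (([] : List Int), (0 : Int))).1

-- loop body of B's 'for c in s[:N-1]' (named helper; [::-1] / reversed(…) ported as reverse,
-- exact by PySem.List.slice?_none_none_neg_one)
def pvStepB (dp : List Int) (c : Char) : List Int :=
  let M : Int := 10 ^ 9 + 7
  if '<' < c then
    (pvCumsums (PySem.List.slice dp (some 1) none).reverse M).reverse
  else
    pvCumsums (PySem.List.slice dp none (some (-1))) M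

def count_valid_permutations_alt (N : Int) (s : String) : Int :=
  let M : Int := 10 ^ 9 + 7
  -- for i in range(N-1): branch on s[i]  (s[i] exists under Pre_)
  let dp := (PySem.List.pyRange 0 (N - 1) 1).foldl
    (fun dp i => pvStepB dp ((PySem.Str.pyGet? s i).getD ' '))
    (List.replicate N.toNat (1 : Int))
  PySem.Int.mod (PySem.List.pyGetD dp 0 0) M

-- ===== PRECONDITION & SPEC =====
-- Pre_ = exactly where A returns: N ≥ 1 (else d[0] raises IndexError) and
-- len(s) ≥ N-1 (else s[N-1-k] raises IndexError).
def Pre_count_valid_permutations (N : Int) (s : String) : Prop :=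
  1 ≤ N ∧ N - 1 ≤ PySem.Str.len s
instance (N : Int) (s : String) : Decidable (Pre_count_valid_permutations N s) := by
  unfold Pre_count_valid_permutations; infer_instance

def pvWitness_count_valid_permutations : Int × String := (3, "<>")

def Spec_count_valid_permutations (N : Int) (s : String) (out : Int) : Prop := out = count_valid_permutations_alt N s
instance (N : Int) (s : String) (out : Int) : Decidable (Spec_count_valid_permutations N s out) := by unfold Spec_count_valid_permutations; infer_instance

-- ===== CLAIM (what is proved, stated in full; the proofs are below) =====
def Claim_equal_count_valid_permutations : Prop := ∀ (N : Int) (s : String), Dom_count_valid_permutations N s → Pre_count_valid_permutations N s → Spec_count_valid_permutations N s (count_valid_permutations N s)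

-- ===== LEMMAS AND PROOFS =====

lemma pvCast_mod (x : Int) : (((PySem.Int.mod x (10 ^ 9 + 7)) : Int) : ZMod 1000000007) = (x : ZMod 1000000007) := by
  rw [PySem.Int.mod_eq_emod_of_pos (by norm_num), ZMod.intCast_eq_intCast_iff]
  unfold Int.ModEq
  have h : ((1000000007 : ℕ) : ℤ) = 10 ^ 9 + 7 := by norm_num
  rw [h]
  exact Int.emod_emod_of_dvd x dvd_rfl

lemma pv_getD_set (l : List Int) (m j : Nat) (v : Int) :
  (l.set m v).getD j 0 = if m = j ∧ m < l.length then v else l.getD j 0 := by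
  simp only [List.getD_eq_getElem?_getD, List.getElem?_set]
  split_ifs with h1 h2 h3 <;> simp_all
  omega

lemma pv_foldl_len {β : Type} (f : List Int → β → List Int)
    (h : ∀ nn b, (f nn b).length = nn.length) :
    ∀ (l : List β) (nn : List Int), (l.foldl f nn).length = nn.length := by
  intro l
  induction l with
  | nil => intro nn; rfl
  | cons b bs ih => intro nn; simp [List.foldl_cons, ih, h]

lemma pv_getD_reverse (l : List Int) (j : Nat) (hj : j < l.length) :
    l.reverse.getD j 0 = l.getD (l.length - 1 - j) 0 := by
  simp only [List.getD_eq_getElem?_getD]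
  rw [List.getElem?_eq_getElem (by simpa using hj), List.getElem?_eq_getElem (by omega)]
  simp [List.getElem_reverse]

lemma pv_getD_tail (l : List Int) (j : Nat) :
    l.tail.getD j 0 = l.getD (j + 1) 0 := by
  simp only [List.getD_eq_getElem?_getD]
  rw [List.getElem?_tail]

lemma pv_getD_dropLast (l : List Int) (j : Nat) (hj : j < l.length - 1) :
    l.dropLast.getD j 0 = l.getD j 0 := by
  simp only [List.getD_eq_getElem?_getD]
  rw [List.getElem?_eq_getElem (by simp; omega), List.getElem?_eq_getElem (by omega)]
  simp [List.getElem_dropLast]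
-- proof-side models of A's inner loop bodies (Nat-indexed)
def pvGBody (d : List Int) (nn : List Int) (i : Nat) : List Int :=
  (nn.set 0 (nn.getD 0 0 + d.getD i 0)).set i
    ((nn.set 0 (nn.getD 0 0 + d.getD i 0)).getD i 0 - d.getD i 0)

def pvLBody (d : List Int) (k : Nat) (nn : List Int) (i : Nat) : List Int :=
  (nn.set i (nn.getD i 0 + d.getD i 0)).set k
    ((nn.set i (nn.getD i 0 + d.getD i 0)).getD k 0 - d.getD i 0)

lemma pvGBody_len (d nn : List Int) (i : Nat) : (pvGBody d nn i).length = nn.length := by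
  simp [pvGBody]

lemma pvLBody_len (d : List Int) (k : Nat) (nn : List Int) (i : Nat) :
    (pvLBody d k nn i).length = nn.length := by
  simp [pvLBody]

lemma pvInnerG (d : List Int) (n : Nat) :
    ∀ T, T ≤ n → ∀ j,
    ((List.range T).foldl (pvGBody d) (List.replicate n (0:Int))).getD j 0 =
      if j = 0 then ∑ i ∈ Finset.Ico 1 T, d.getD i 0
      else if j < T then -(d.getD j 0) else 0 := by
  intro T
  induction T with
  | zero =>
    intro _ j
    simp only [List.range_zero, List.foldl_nil]
    have hrep : (List.replicate n (0:Int)).getD j 0 = 0 := by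
      simp [List.getD_eq_getElem?_getD, List.getElem?_replicate]
      split_ifs
      · rfl
      · rfl
    rw [hrep]
    by_cases hj0 : j = 0
    · simp [hj0]
    · rw [if_neg hj0, if_neg (by omega)]
  | succ T ih =>
    intro hT j
    have hlen : ((List.range T).foldl (pvGBody d) (List.replicate n (0:Int))).length = n := by
      rw [pv_foldl_len _ (pvGBody_len d)]; simp
    rw [List.range_succ, List.foldl_append, List.foldl_cons, List.foldl_nil]
    set prev := (List.range T).foldl (pvGBody d) (List.replicate n (0:Int)) with hprev
    have hp := ih (by omega)
    have hsum : 0 < T → ∑ i ∈ Finset.Ico 1 (T+1), d.getD i 0 = (∑ i ∈ Finset.Ico 1 T, d.getD i 0) + d.getD T 0 := by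
      intro hTpos
      rw [Finset.sum_Ico_succ_top (by omega)]
    unfold pvGBody
    rw [pv_getD_set, pv_getD_set, pv_getD_set]
    simp only [List.length_set, hlen]
    by_cases hj0 : j = 0
    · subst hj0
      rcases Nat.eq_zero_or_pos T with hT0 | hTpos
      · subst hT0
        rw [if_pos ⟨rfl, by omega⟩, if_pos ⟨rfl, by omega⟩, if_pos rfl]
        have h0 := hp 0
        rw [if_pos rfl] at h0
        rw [h0]
        simp
      · rw [if_neg (by omega), if_pos ⟨rfl, by omega⟩, if_pos rfl, hsum hTpos]
        have h0 := hp 0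
        rw [if_pos rfl] at h0
        rw [h0]
    · by_cases hjT : j = T
      · subst hjT
        rw [if_pos ⟨rfl, by omega⟩, if_neg (by omega), if_neg hj0, if_pos (by omega)]
        have hpj := hp j
        rw [if_neg (by omega), if_neg (by omega)] at hpj
        rw [hpj]
        ring
      · rw [if_neg (by omega), if_neg (by omega), hp j]
        by_cases hlt : j < T
        · rw [if_neg hj0, if_neg hj0, if_pos hlt, if_pos (by omega)]
        · rw [if_neg hj0, if_neg hj0, if_neg hlt, if_neg (by omega)]

lemma pvInnerL (d : List Int) (n k : Nat) (hk : k < n) :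
    ∀ T, T ≤ k + 1 → ∀ j,
    ((List.range T).foldl (pvLBody d k) (List.replicate n (0:Int))).getD j 0 =
      if j = k then (if T = k + 1 then d.getD k 0 else 0) - ∑ i ∈ Finset.range T, d.getD i 0
      else if j < T then d.getD j 0 else 0 := by
  intro T
  induction T with
  | zero =>
    intro _ j
    simp only [List.range_zero, List.foldl_nil]
    have hrep : (List.replicate n (0:Int)).getD j 0 = 0 := by
      simp [List.getD_eq_getElem?_getD, List.getElem?_replicate]
      split_ifs
      · rfl
      · rfl
    rw [hrep]
    by_cases hjk : j = k
    · rw [if_pos hjk, if_neg (by omega)]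
      simp
    · rw [if_neg hjk, if_neg (by omega)]
  | succ T ih =>
    intro hT j
    have hlen : ((List.range T).foldl (pvLBody d k) (List.replicate n (0:Int))).length = n := by
      rw [pv_foldl_len _ (pvLBody_len d k)]; simp
    rw [List.range_succ, List.foldl_append, List.foldl_cons, List.foldl_nil]
    set prev := (List.range T).foldl (pvLBody d k) (List.replicate n (0:Int)) with hprev
    have hp := ih (by omega)
    have hsum : ∑ i ∈ Finset.range (T+1), d.getD i 0 = (∑ i ∈ Finset.range T, d.getD i 0) + d.getD T 0 :=
      Finset.sum_range_succ _ _
    unfold pvLBody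
    rw [pv_getD_set, pv_getD_set, pv_getD_set]
    simp only [List.length_set, hlen]
    by_cases hTk : T = k
    · -- step index equals k: set k twice, net value unchanged at k
      subst hTk
      by_cases hjk : j = T
      · subst hjk
        rw [if_pos ⟨rfl, by omega⟩, if_pos ⟨rfl, by omega⟩]
        have hpj := hp j
        rw [if_pos rfl, if_neg (by omega)] at hpj
        rw [hpj, if_pos rfl, if_pos rfl, hsum]
        ring
      · rw [if_neg (by omega), if_neg (by omega), hp j, if_neg hjk, if_neg hjk]
        by_cases hlt : j < T
        · rw [if_pos hlt, if_pos (by omega)]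
        · rw [if_neg hlt, if_neg (by omega)]
    · by_cases hjk : j = k
      · subst hjk
        rw [if_pos ⟨rfl, by omega⟩, if_neg (by omega), hp j, if_pos rfl, if_neg (by omega),
          if_pos rfl, if_neg (by omega), hsum]
        ring
      · by_cases hjT : j = T
        · subst hjT
          rw [if_neg (by omega), if_pos ⟨rfl, by omega⟩, hp j, if_neg (by omega), if_neg (by omega),
            if_neg hjk, if_pos (by omega)]
          ring
        · rw [if_neg (by omega), if_neg (by omega), hp j, if_neg hjk, if_neg hjk]
          by_cases hlt : j < T
          · rw [if_pos hlt, if_pos (by omega)]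
          · rw [if_neg hlt, if_neg (by omega)]

-- proof-side model of A's in-place prefix pass
def pvPBody (nn : List Int) (i : Nat) : List Int :=
  nn.set (i + 1) (PySem.Int.mod (nn.getD (i + 1) 0 + nn.getD i 0) (10 ^ 9 + 7))

-- running value the pass stores at position j (computed from the ORIGINAL array)
def pvPm (nn0 : List Int) : Nat → Int
  | 0 => nn0.getD 0 0
  | j + 1 => PySem.Int.mod (nn0.getD (j + 1) 0 + pvPm nn0 j) (10 ^ 9 + 7)

lemma pvPrefix (nn0 : List Int) (n : Nat) (h : nn0.length = n) :
    ∀ T, T < n → ∀ j,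
    ((List.range T).foldl pvPBody nn0).getD j 0 =
      if j ≤ T then pvPm nn0 j else nn0.getD j 0 := by
  intro T
  induction T with
  | zero =>
    intro _ j
    simp only [List.range_zero, List.foldl_nil]
    by_cases hj : j = 0
    · subst hj; rw [if_pos (by omega)]; rfl
    · rw [if_neg (by omega)]
  | succ T ih =>
    intro hT j
    have hlen : ((List.range T).foldl pvPBody nn0).length = n := by
      rw [pv_foldl_len _ (fun nn b => by simp [pvPBody])]; exact h
    rw [List.range_succ, List.foldl_append, List.foldl_cons, List.foldl_nil]
    set prev := (List.range T).foldl pvPBody nn0 with hprev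
    have hp := ih (by omega)
    unfold pvPBody
    rw [pv_getD_set]
    simp only [hlen]
    by_cases hj : j = T + 1
    · subst hj
      rw [if_pos ⟨rfl, by omega⟩, if_pos (le_refl _), hp (T+1), hp T, if_neg (by omega),
        if_pos (le_refl _)]
      rfl
    · rw [if_neg (by omega), hp j]
      by_cases hle : j ≤ T
      · rw [if_pos hle, if_pos (by omega)]
      · rw [if_neg hle, if_neg (by omega)]

lemma pvPm_cast (nn0 : List Int) :
    ∀ j, ((pvPm nn0 j : Int) : ZMod 1000000007) =
      ∑ i ∈ Finset.range (j + 1), ((nn0.getD i 0 : Int) : ZMod 1000000007) := by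
  intro j
  induction j with
  | zero => simp [pvPm]
  | succ j ih =>
    rw [pvPm, pvCast_mod, Int.cast_add, ih, Finset.sum_range_succ _ (j + 1)]
    ring

lemma pvStepA_char (N : Int) (s : String) (n : Nat) (hN : N = (n : Int)) (k : Nat)
    (_hk1 : 1 ≤ k) (hk : k < n) (d : List Int) (hd : d.length = n) (c : Char)
    (hc : PySem.Str.pyGet? s (N - 1 - (k : Int)) = some c) :
    (pvStepA N s d (k : Int)).length = n ∧
    ∀ j, j < k → ((pvStepA N s d (k : Int)).getD j 0 : ZMod 1000000007) =
      if '<' < c then ∑ i ∈ Finset.Ico (j + 1) (k + 1), ((d.getD i 0 : Int) : ZMod 1000000007)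
      else ∑ i ∈ Finset.range (j + 1), ((d.getD i 0 : Int) : ZMod 1000000007) := by
  unfold pvStepA
  rw [hc]
  simp only [Option.getD_some]
  have h1 : (k : Int) + 1 = ((k + 1 : Nat) : Int) := by omega
  have h2 : (k : Int) = ((k : Nat) : Int) := rfl
  rw [h1, PySem.List.pyRange_zero_nat, h2, PySem.List.pyRange_zero_nat, List.foldl_map,
    List.foldl_map]
  have hNt : N.toNat = n := by rw [hN]; exact Int.toNat_natCast n
  rw [hNt]
  by_cases hcond : '<' < c
  · simp only [if_pos hcond]
    have hbody : (fun (nn : List Int) (i : Nat) =>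
        PySem.List.pySetD (PySem.List.pySetD nn 0 (PySem.List.pyGetD nn 0 0 + PySem.List.pyGetD d (i : Int) 0)) (i : Int)
          (PySem.List.pyGetD (PySem.List.pySetD nn 0 (PySem.List.pyGetD nn 0 0 + PySem.List.pyGetD d (i : Int) 0)) (i : Int) 0
            - PySem.List.pyGetD d (i : Int) 0)) = pvGBody d := by
      funext nn i
      simp [pvGBody, PySem.List.pySetD_of_nonneg, PySem.List.pyGetD_of_nonneg,
        Int.toNat_natCast]
    rw [hbody]
    have hbody2 : (fun (nn : List Int) (i : Nat) =>
        PySem.List.pySetD nn ((i : Int) + 1)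
          (PySem.Int.mod (PySem.List.pyGetD nn ((i : Int) + 1) 0 + PySem.List.pyGetD nn (i : Int) 0) (10 ^ 9 + 7))) = pvPBody := by
      funext nn i
      have e1 : ((i : Int) + 1) = (((i + 1 : Nat)) : Int) := by omega
      rw [e1, PySem.List.pySetD_natCast, PySem.List.pyGetD_natCast, PySem.List.pyGetD_natCast]
      rfl
    rw [hbody2]
    set nn1 := (List.range (k + 1)).foldl (pvGBody d) (List.replicate n (0 : Int)) with hnn1
    have hlen1 : nn1.length = n := by rw [hnn1, pv_foldl_len _ (pvGBody_len d)]; simp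
    have hlenF : ((List.range k).foldl pvPBody nn1).length = n := by
      rw [pv_foldl_len _ (fun nn b => by simp [pvPBody])]; exact hlen1
    refine ⟨hlenF, ?_⟩
    intro j hj
    rw [pvPrefix nn1 n hlen1 k hk j, if_pos (by omega), pvPm_cast]
    have hG := pvInnerG d n (k + 1) (by omega)
    rw [Finset.sum_range_succ']
    have hf0 : ((nn1.getD 0 0 : Int) : ZMod 1000000007)
        = ∑ i ∈ Finset.Ico 1 (k + 1), ((d.getD i 0 : Int) : ZMod 1000000007) := by
      rw [hG 0, if_pos rfl]
      push_cast
      rfl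
    have hfs : ∀ i ∈ Finset.range j, ((nn1.getD (i + 1) 0 : Int) : ZMod 1000000007)
        = -((d.getD (i + 1) 0 : Int) : ZMod 1000000007) := by
      intro i hi
      rw [Finset.mem_range] at hi
      rw [hG (i + 1), if_neg (by omega), if_pos (by omega)]
      push_cast
      ring
    rw [Finset.sum_congr rfl hfs, hf0]
    have hsplit : (∑ i ∈ Finset.Ico 1 (j + 1), ((d.getD i 0 : Int) : ZMod 1000000007))
        + ∑ i ∈ Finset.Ico (j + 1) (k + 1), ((d.getD i 0 : Int) : ZMod 1000000007)
        = ∑ i ∈ Finset.Ico 1 (k + 1), ((d.getD i 0 : Int) : ZMod 1000000007) :=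
      Finset.sum_Ico_consecutive _ (by omega) (by omega)
    have hre : (∑ i ∈ Finset.range j, -((d.getD (i + 1) 0 : Int) : ZMod 1000000007))
        = -∑ i ∈ Finset.Ico 1 (j + 1), ((d.getD i 0 : Int) : ZMod 1000000007) := by
      rw [Finset.sum_Ico_eq_sum_range]
      simp only [Nat.add_sub_cancel]
      rw [← Finset.sum_neg_distrib]
      exact Finset.sum_congr rfl (fun i _ => by rw [Nat.add_comm 1 i])
    rw [hre, ← hsplit]
    ring
  · simp only [if_neg hcond]
    have hbody : (fun (nn : List Int) (i : Nat) =>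
        PySem.List.pySetD (PySem.List.pySetD nn (i : Int) (PySem.List.pyGetD nn (i : Int) 0 + PySem.List.pyGetD d (i : Int) 0)) ((k : Nat) : Int)
          (PySem.List.pyGetD (PySem.List.pySetD nn (i : Int) (PySem.List.pyGetD nn (i : Int) 0 + PySem.List.pyGetD d (i : Int) 0)) ((k : Nat) : Int) 0
            - PySem.List.pyGetD d (i : Int) 0)) = pvLBody d k := by
      funext nn i
      simp [pvLBody, PySem.List.pySetD_of_nonneg, PySem.List.pyGetD_of_nonneg,
        Int.toNat_natCast]
    rw [hbody]
    have hbody2 : (fun (nn : List Int) (i : Nat) =>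
        PySem.List.pySetD nn ((i : Int) + 1)
          (PySem.Int.mod (PySem.List.pyGetD nn ((i : Int) + 1) 0 + PySem.List.pyGetD nn (i : Int) 0) (10 ^ 9 + 7))) = pvPBody := by
      funext nn i
      have e1 : ((i : Int) + 1) = (((i + 1 : Nat)) : Int) := by omega
      rw [e1, PySem.List.pySetD_natCast, PySem.List.pyGetD_natCast, PySem.List.pyGetD_natCast]
      rfl
    rw [hbody2]
    set nn1 := (List.range (k + 1)).foldl (pvLBody d k) (List.replicate n (0 : Int)) with hnn1
    have hlen1 : nn1.length = n := by rw [hnn1, pv_foldl_len _ (pvLBody_len d k)]; simp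
    have hlenF : ((List.range k).foldl pvPBody nn1).length = n := by
      rw [pv_foldl_len _ (fun nn b => by simp [pvPBody])]; exact hlen1
    refine ⟨hlenF, ?_⟩
    intro j hj
    rw [pvPrefix nn1 n hlen1 k hk j, if_pos (by omega), pvPm_cast]
    have hL := pvInnerL d n k hk (k + 1) (le_refl _)
    refine Finset.sum_congr rfl ?_
    intro i hi
    rw [Finset.mem_range] at hi
    rw [hL i, if_neg (by omega), if_pos (by omega)]

-- proof-side model of _cumsums: running sums mod M, recursively
def pvCumRec (t : Int) : List Int → List Int
  | [] => []
  | v :: vs => PySem.Int.mod (t + v) (10 ^ 9 + 7) :: pvCumRec (PySem.Int.mod (t + v) (10 ^ 9 + 7)) vs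

def pvLastT (t : Int) : List Int → Int
  | [] => t
  | v :: vs => pvLastT (PySem.Int.mod (t + v) (10 ^ 9 + 7)) vs

lemma pvCumsums_fold (vs : List Int) : ∀ (acc : List Int) (t : Int),
    (vs.foldl (fun (p : List Int × Int) v =>
      (p.1 ++ [PySem.Int.mod (p.2 + v) (10 ^ 9 + 7)], PySem.Int.mod (p.2 + v) (10 ^ 9 + 7)))
      (acc, t)) = (acc ++ pvCumRec t vs, pvLastT t vs) := by
  induction vs with
  | nil => intro acc t; simp [pvCumRec, pvLastT]
  | cons v vs ih =>
    intro acc t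
    rw [List.foldl_cons]
    simp only []
    rw [ih]
    simp [pvCumRec, pvLastT]

lemma pvCumsums_eq (vals : List Int) : pvCumsums vals (10 ^ 9 + 7) = pvCumRec 0 vals := by
  unfold pvCumsums
  rw [pvCumsums_fold]
  simp

lemma pvCumRec_len (vs : List Int) : ∀ t, (pvCumRec t vs).length = vs.length := by
  induction vs with
  | nil => intro t; rfl
  | cons v vs ih => intro t; simp [pvCumRec, ih]

lemma pvCumRec_getD_cast (vs : List Int) : ∀ (j : Nat), j < vs.length → ∀ (t : Int),
    (((pvCumRec t vs).getD j 0 : Int) : ZMod 1000000007) =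
      (t : ZMod 1000000007) + ∑ i ∈ Finset.range (j + 1), ((vs.getD i 0 : Int) : ZMod 1000000007) := by
  induction vs with
  | nil => intro j hj; simp at hj
  | cons v vs ih =>
    intro j hj t
    cases j with
    | zero =>
      simp only [pvCumRec, List.getD_cons_zero, pvCast_mod]
      rw [Finset.sum_range_one]
      simp
    | succ j =>
      simp only [pvCumRec, List.getD_cons_succ]
      rw [ih j (by simpa using hj), pvCast_mod]
      conv_rhs => rw [Finset.sum_range_succ']
      simp only [List.getD_cons_succ, List.getD_cons_zero]
      push_cast
      ring

lemma pvStepB_char (k : Nat) (dp : List Int) (hdp : dp.length = k + 1) (c : Char) :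
    (pvStepB dp c).length = k ∧
    ∀ j, j < k → ((pvStepB dp c).getD j 0 : ZMod 1000000007) =
      if '<' < c then ∑ i ∈ Finset.Ico (j + 1) (k + 1), ((dp.getD i 0 : Int) : ZMod 1000000007)
      else ∑ i ∈ Finset.range (j + 1), ((dp.getD i 0 : Int) : ZMod 1000000007) := by
  unfold pvStepB
  simp only [PySem.List.slice_from_one, PySem.List.slice_to_neg_one]
  have htl : dp.tail.length = k := by simp [hdp]
  have hdl : dp.dropLast.length = k := by simp [hdp]
  by_cases hc : '<' < c
  · simp only [if_pos hc, pvCumsums_eq]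
    have hlen : (pvCumRec 0 dp.tail.reverse).length = k := by
      rw [pvCumRec_len]; simp [htl]
    refine ⟨by simp [hlen], ?_⟩
    intro j hj
    rw [pv_getD_reverse _ j (by simp [hlen]; omega)]
    simp only [hlen]
    rw [pvCumRec_getD_cast _ (k - 1 - j) (by simp [htl]; omega) 0]
    have hidx : k - 1 - j + 1 = k - j := by omega
    rw [hidx]
    have hrev : ∀ i ∈ Finset.range (k - j),
        ((dp.tail.reverse.getD i 0 : Int) : ZMod 1000000007)
          = ((dp.getD (k - i) 0 : Int) : ZMod 1000000007) := by
      intro i hi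
      rw [Finset.mem_range] at hi
      rw [pv_getD_reverse _ i (by omega), htl, pv_getD_tail]
      congr 2
      omega
    rw [Finset.sum_congr rfl hrev]
    conv_rhs => rw [Finset.sum_Ico_eq_sum_range]
    have h2 : k + 1 - (j + 1) = k - j := by omega
    rw [h2,
      ← Finset.sum_range_reflect (fun i => ((dp.getD (j + 1 + i) 0 : Int) : ZMod 1000000007)) (k - j)]
    simp only [Int.cast_zero, zero_add]
    refine Finset.sum_congr rfl ?_
    intro i hi
    rw [Finset.mem_range] at hi
    congr 2
    omega
  · simp only [if_neg hc, pvCumsums_eq]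
    have hlen : (pvCumRec 0 dp.dropLast).length = k := by rw [pvCumRec_len, hdl]
    refine ⟨hlen, ?_⟩
    intro j hj
    rw [pvCumRec_getD_cast _ j (by omega) 0]
    simp only [Int.cast_zero, zero_add]
    refine Finset.sum_congr rfl ?_
    intro i hi
    rw [Finset.mem_range] at hi
    rw [pv_getD_dropLast _ i (by omega)]

lemma pvMain (N : Int) (s : String) (n : Nat) (hN : N = (n : Int))
    (hs : (n : Int) - 1 ≤ (s.toList.length : Int)) :
    ∀ (k : Nat), k + 1 ≤ n → ∀ (d dp : List Int), d.length = n → dp.length = k + 1 →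
    (∀ j, j < k + 1 →
      ((d.getD j 0 : Int) : ZMod 1000000007) = ((dp.getD j 0 : Int) : ZMod 1000000007)) →
    ((((PySem.List.pyRange (k : Int) 0 (-1)).foldl (pvStepA N s) d).getD 0 0 : Int) : ZMod 1000000007)
      = ((((PySem.List.pyRange ((n - 1 - k : Nat) : Int) ((n - 1 : Nat) : Int) 1).foldl
            (fun dp i => pvStepB dp ((PySem.Str.pyGet? s i).getD ' ')) dp).getD 0 0 : Int) : ZMod 1000000007) := by
  intro k
  induction k generalizing N s with
  | zero =>
    intro hk d dp hd hdp hinv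
    rw [Nat.cast_zero, PySem.List.pyRange_neg_one_eq_nil (le_refl 0),
      PySem.List.pyRange_one_eq_nil (by simp)]
    exact hinv 0 (by omega)
  | succ k ih =>
    intro hk d dp hd hdp hinv
    have hsL : n - 1 ≤ s.toList.length := by omega
    have hm3 : n - 1 - (k + 1) < s.toList.length := by omega
    have hconsA : PySem.List.pyRange ((k + 1 : Nat) : Int) 0 (-1)
        = ((k + 1 : Nat) : Int) :: PySem.List.pyRange ((k : Nat) : Int) 0 (-1) := by
      rw [PySem.List.pyRange_neg_one_cons (by push_cast; omega)]
      congr 1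
      push_cast
      ring
    have hconsB : PySem.List.pyRange ((n - 1 - (k + 1) : Nat) : Int) ((n - 1 : Nat) : Int) 1
        = ((n - 1 - (k + 1) : Nat) : Int) :: PySem.List.pyRange ((n - 1 - k : Nat) : Int) ((n - 1 : Nat) : Int) 1 := by
      rw [PySem.List.pyRange_one_cons (by push_cast; omega)]
      have e : ((n - 1 - (k + 1) : Nat) : Int) + 1 = ((n - 1 - k : Nat) : Int) := by omega
      rw [e]
    set c := s.toList[n - 1 - (k + 1)]'hm3 with hcdef
    have hc : PySem.Str.pyGet? s (N - 1 - ((k + 1 : Nat) : Int)) = some c := by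
      have hidx : N - 1 - ((k + 1 : Nat) : Int) = ((n - 1 - (k + 1) : Nat) : Int) := by
        rw [hN]; push_cast; omega
      rw [hidx, PySem.Str.pyGet?_natCast, List.getElem?_eq_getElem hm3]
    have hbc : (PySem.Str.pyGet? s ((n - 1 - (k + 1) : Nat) : Int)).getD ' ' = c := by
      rw [PySem.Str.pyGet?_natCast, List.getElem?_eq_getElem hm3]
      rfl
    obtain ⟨hlenA, hvalA⟩ := pvStepA_char N s n hN (k + 1) (by omega) (by omega) d hd c hc
    obtain ⟨hlenB, hvalB⟩ := pvStepB_char (k + 1) dp hdp c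
    rw [hconsA, hconsB, List.foldl_cons, List.foldl_cons, hbc]
    apply ih N s hN hs (by omega) _ _ hlenA hlenB
    intro j hj
    rw [hvalA j (by omega), hvalB j (by omega)]
    by_cases hcc : '<' < c
    · rw [if_pos hcc, if_pos hcc]
      refine Finset.sum_congr rfl ?_
      intro i hi
      rw [Finset.mem_Ico] at hi
      exact hinv i (by omega)
    · rw [if_neg hcc, if_neg hcc]
      refine Finset.sum_congr rfl ?_
      intro i hi
      rw [Finset.mem_range] at hi
      exact hinv i (by omega)

lemma pv_mod_eq_of_cast {x y : Int} (h : (x : ZMod 1000000007) = (y : ZMod 1000000007)) :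
    PySem.Int.mod x (10 ^ 9 + 7) = PySem.Int.mod y (10 ^ 9 + 7) := by
  rw [PySem.Int.mod_eq_emod_of_pos (by norm_num), PySem.Int.mod_eq_emod_of_pos (by norm_num)]
  rw [ZMod.intCast_eq_intCast_iff] at h
  have h2 : ((1000000007 : ℕ) : ℤ) = 10 ^ 9 + 7 := by norm_num
  unfold Int.ModEq at h
  rw [h2] at h
  exact h

theorem pv_final (N : Int) (s : String) (h1 : 1 ≤ N) (h2' : N - 1 ≤ PySem.Str.len s) :
    count_valid_permutations N s = count_valid_permutations_alt N s := by
  have h2 := h2'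
  rw [PySem.Str.len_eq] at h2
  have hN : N = (N.toNat : Int) := by omega
  set n := N.toNat with hn
  have hs : (n : Int) - 1 ≤ (s.toList.length : Int) := by omega
  simp only [count_valid_permutations, count_valid_permutations_alt]
  apply pv_mod_eq_of_cast
  rw [PySem.List.pyGetD_zero, PySem.List.pyGetD_zero]
  have hA : PySem.List.pyRange (N - 1) 0 (-1) = PySem.List.pyRange (((n - 1 : Nat)) : Int) 0 (-1) := by
    congr 1
    push_cast
    omega
  have hB : PySem.List.pyRange 0 (N - 1) 1
      = PySem.List.pyRange ((n - 1 - (n - 1) : Nat) : Int) ((n - 1 : Nat) : Int) 1 := by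
    congr 1
    · push_cast
      omega
    · push_cast
      omega
  rw [hA, hB]
  exact pvMain N s n hN hs (n - 1) (by omega) (List.replicate n (1 : Int)) (List.replicate n (1 : Int))
    (by simp) (by simp; omega) (fun j hj => rfl)

-- ===== VERDICT (by name: the statement is the Claim_ definition above) =====
theorem count_valid_permutations_spec : Claim_equal_count_valid_permutations := by
  intro N s _ hpre
  have h : 1 ≤ N ∧ N - 1 ≤ PySem.Str.len s := hpre
  unfold Spec_count_valid_permutations
  exact pv_final N s h.1 h.2
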